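-- pv_equiv track=rewrite | github.com/james5635/GeekForGeek-Data-Structure-and-Algorithm | array/sorted_subsequence_size_3/sorted_subsequence_size_3.py | find_sorted_subsequence_naive
-- ===== SOURCE A (Python) =====
-- def find_sorted_subsequence_naive(arr):
--     """
--     Naive approach: Check all possible triplets.
--
--     Time Complexity: O(n³)
--     Space Complexity: O(1)
--
--     Args:
--         arr: List of integers
--
--     Returns:
--         Tuple of 3 indices (i, j, k) or None if not found
--     """
--     n = len(arr)
--
--     for i in range(n - 2):
--         for j in range(i + 1, n - 1):
--             for k in range(j + 1, n):
--                 if arr[i] < arr[j] < arr[k]: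
--                     return (i, j, k)
--
--     return None
-- ===== SOURCE B (Python) =====
-- def find_sorted_subsequence_naive(arr):
--     """Monotonic-stack next-greater table, then a double scan over (i, j).
--
--     The stack pass computes, for each j, the smallest k > j with arr[k] > arr[j].
--     """
--     n = len(arr)
--     nxt = {}          # j -> smallest k > j with arr[k] > arr[j]
--     stack = []
--     for k in range(n):
--         while stack and arr[stack[-1]] < arr[k]:
--             nxt[stack.pop()] = k
--         stack.append(k)
--     for i in range(n - 2):
--         for j in range(i + 1, n - 1):
--             if arr[i] < arr[j] and j in nxt:
--                 return (i, j, nxt[j])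
--     return None
-- ===== Notes on version B (the rewrite author's own statement) =====
-- stated objective: faster
-- what changed: Replaces A's triple-nested index scan by a monotonic-stack pass that builds a next-greater-index dict (smallest k>j with arr[k]>arr[j]) in O(n), followed by a double scan over (i, j), removing the innermost loop.
import Mathlib
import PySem

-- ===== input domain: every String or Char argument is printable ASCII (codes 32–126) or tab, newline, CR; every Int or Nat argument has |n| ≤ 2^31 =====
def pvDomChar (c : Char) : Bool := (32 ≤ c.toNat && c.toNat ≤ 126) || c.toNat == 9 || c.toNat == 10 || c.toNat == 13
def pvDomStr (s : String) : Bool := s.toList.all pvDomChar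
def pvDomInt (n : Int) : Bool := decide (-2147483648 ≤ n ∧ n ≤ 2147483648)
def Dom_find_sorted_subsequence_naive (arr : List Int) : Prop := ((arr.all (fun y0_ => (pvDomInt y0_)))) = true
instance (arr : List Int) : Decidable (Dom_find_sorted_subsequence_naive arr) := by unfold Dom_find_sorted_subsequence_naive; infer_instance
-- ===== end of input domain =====

-- B replaces A's O(n^3) triple-nested scan by a monotonic-stack next-greater table plus a double (i, j) scan (faster, asymptotic).

-- ===== PORT A =====
-- innermost loop: for k in range(j+1, n): if arr[i] < arr[j] < arr[k]: return (i, j, k)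
def pvA_loopK (arr : List Int) (i j : Int) : List Int → Option (List Int)
  | [] => none
  | k :: ks =>
    if PySem.List.pyGetD arr i 0 < PySem.List.pyGetD arr j 0 ∧
       PySem.List.pyGetD arr j 0 < PySem.List.pyGetD arr k 0
    then some [i, j, k] else pvA_loopK arr i j ks

def pvA_loopJ (arr : List Int) (n i : Int) : List Int → Option (List Int)
  | [] => none
  | j :: js =>
    match pvA_loopK arr i j (PySem.List.pyRange (j + 1) n 1) with
    | some r => some r
    | none => pvA_loopJ arr n i js

def pvA_loopI (arr : List Int) (n : Int) : List Int → Option (List Int)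
  | [] => none
  | i :: is_ =>
    match pvA_loopJ arr n i (PySem.List.pyRange (i + 1) (n - 1) 1) with
    | some r => some r
    | none => pvA_loopI arr n is_

def find_sorted_subsequence_naive (arr : List Int) : Option (List Int) :=
  let n : Int := PySem.List.len arr
  pvA_loopI arr n (PySem.List.pyRange 0 (n - 2) 1)

-- ===== PORT B =====
-- the Python list 'stack' (append / pop at the RIGHT end) is encoded top-at-head: push = cons, stack[-1] = head
-- while stack and arr[stack[-1]] < arr[k]: nxt[stack.pop()] = k
def pvB_pop (arr : List Int) (k : Int) :
    List Int → PySem.Dict Int Int → List Int × PySem.Dict Int Int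
  | [], nxt => ([], nxt)
  | t :: rest, nxt =>
    if PySem.List.pyGetD arr t 0 < PySem.List.pyGetD arr k 0 then
      pvB_pop arr k rest (nxt.insert t k)
    else (t :: rest, nxt)

-- for k in range(n): <while loop>; stack.append(k)
def pvB_build (arr : List Int) : List Int → List Int × PySem.Dict Int Int → List Int × PySem.Dict Int Int
  | [], st => st
  | k :: ks, st =>
    let p := pvB_pop arr k st.1 st.2
    pvB_build arr ks (k :: p.1, p.2)

-- for j in range(i+1, n-1): if arr[i] < arr[j] and j in nxt: return (i, j, nxt[j])
def pvB_scanJ (arr : List Int) (nxt : PySem.Dict Int Int) (i : Int) : List Int → Option (List Int)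
  | [] => none
  | j :: js =>
    if PySem.List.pyGetD arr i 0 < PySem.List.pyGetD arr j 0 then
      match nxt.get? j with
      | some k => some [i, j, k]
      | none => pvB_scanJ arr nxt i js
    else pvB_scanJ arr nxt i js

def pvB_scanI (arr : List Int) (nxt : PySem.Dict Int Int) (n : Int) : List Int → Option (List Int)
  | [] => none
  | i :: is_ =>
    match pvB_scanJ arr nxt i (PySem.List.pyRange (i + 1) (n - 1) 1) with
    | some r => some r
    | none => pvB_scanI arr nxt n is_

def find_sorted_subsequence_naive_alt (arr : List Int) : Option (List Int) :=
  let n : Int := PySem.List.len arr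
  let st := pvB_build arr (PySem.List.pyRange 0 n 1) ([], PySem.Dict.empty)
  pvB_scanI arr st.2 n (PySem.List.pyRange 0 (n - 2) 1)

-- ===== PRECONDITION & SPEC =====
def Spec_find_sorted_subsequence_naive (arr : List Int) (out : Option (List Int)) : Prop := out = find_sorted_subsequence_naive_alt arr
instance (arr : List Int) (out : Option (List Int)) : Decidable (Spec_find_sorted_subsequence_naive arr out) := by unfold Spec_find_sorted_subsequence_naive; infer_instance

-- ===== CLAIM (what is proved, stated in full; the proofs are below) =====
def Claim_equal_find_sorted_subsequence_naive : Prop := ∀ (arr : List Int), Dom_find_sorted_subsequence_naive arr → Spec_find_sorted_subsequence_naive arr (find_sorted_subsequence_naive arr)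

-- ===== LEMMAS AND PROOFS =====

-- proof-side reference: first k in ks with arr[k] > arr[j]
def pvFG (arr : List Int) (j : Int) : List Int → Option Int
  | [] => none
  | k :: ks =>
    if PySem.List.pyGetD arr j 0 < PySem.List.pyGetD arr k 0 then some k
    else pvFG arr j ks

theorem pvFG_append (arr : List Int) (j : Int) (ks ls : List Int) :
    pvFG arr j (ks ++ ls) = (pvFG arr j ks).or (pvFG arr j ls) := by
  induction ks with
  | nil => simp [pvFG]
  | cons k ks ih =>
    by_cases h : PySem.List.pyGetD arr j 0 < PySem.List.pyGetD arr k 0 <;>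
      simp [pvFG, h, ih]

-- A's innermost loop is the reference first-greater search, filtered by arr[i] < arr[j].
theorem pvA_loopK_eq (arr : List Int) (i j : Int) (ks : List Int) :
    pvA_loopK arr i j ks =
      if PySem.List.pyGetD arr i 0 < PySem.List.pyGetD arr j 0
      then (pvFG arr j ks).map (fun k => [i, j, k])
      else none := by
  induction ks with
  | nil => simp [pvA_loopK, pvFG]
  | cons k ks ih =>
    simp only [pvA_loopK, pvFG, ih]
    by_cases hij : PySem.List.pyGetD arr i 0 < PySem.List.pyGetD arr j 0 <;>
      by_cases hjk : PySem.List.pyGetD arr j 0 < PySem.List.pyGetD arr k 0 <;>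
      simp [hij, hjk]

-- 'j is unresolved after processing range(0, t)': no k in (j, t) with arr[k] > arr[j]
abbrev pvUnres (arr : List Int) (t j : Int) : Prop :=
  pvFG arr j (PySem.List.pyRange (j + 1) t 1) = none

-- invariant of B's stack pass after processing range(0, t)
def pvInv (arr : List Int) (t : Int) (stack : List Int) (nxt : PySem.Dict Int Int) : Prop :=
  stack = ((PySem.List.pyRange 0 t 1).filter (fun j => decide (pvUnres arr t j))).reverse ∧
  (∀ j : Int, 0 ≤ j → j < t → nxt.get? j = pvFG arr j (PySem.List.pyRange (j + 1) t 1)) ∧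
  (∀ j : Int, t ≤ j → nxt.get? j = none)

-- pop is takeWhile/dropWhile with condition arr[j] < arr[k]
theorem pvB_pop_eq (arr : List Int) (k : Int) (s : List Int) (nxt : PySem.Dict Int Int) :
    pvB_pop arr k s nxt =
      (s.dropWhile (fun j => decide (PySem.List.pyGetD arr j 0 < PySem.List.pyGetD arr k 0)),
       (s.takeWhile (fun j => decide (PySem.List.pyGetD arr j 0 < PySem.List.pyGetD arr k 0))).foldl
         (fun d j => d.insert j k) nxt) := by
  induction s generalizing nxt with
  | nil => simp [pvB_pop]
  | cons t rest ih =>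
    by_cases h : PySem.List.pyGetD arr t 0 < PySem.List.pyGetD arr k 0 <;>
      simp [pvB_pop, h, ih]

theorem takeWhile_eq_filter_of_mono {α : Type} (p : α → Bool) (l : List α)
    (h : l.Pairwise (fun a b => p b = true → p a = true)) :
    l.takeWhile p = l.filter p ∧ l.dropWhile p = l.filter (fun x => ! p x) := by
  induction l with
  | nil => simp
  | cons a l ih =>
    rcases List.pairwise_cons.1 h with ⟨ha, hl⟩
    by_cases hp : p a = true
    · obtain ⟨h1, h2⟩ := ih hl
      simp [hp, h1, h2]
    · have hall : ∀ b ∈ l, ¬ p b = true := fun b hb hpb => hp (ha b hb hpb)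
      constructor
      · simp only [List.takeWhile_cons]
        rw [if_neg hp, List.filter_cons_of_neg (by simpa using hp),
          List.filter_eq_nil_iff.2 hall]
      · simp only [List.dropWhile_cons]
        rw [if_neg hp, List.filter_cons_of_pos (by simpa using hp),
          List.filter_eq_self.2 (fun b hb => by simpa using hall b hb)]

-- lookup after a fold of inserts with a common value
theorem get?_foldl_insert (l : List Int) (k : Int) (nxt : PySem.Dict Int Int) (j : Int) :
    (l.foldl (fun d x => d.insert x k) nxt).get? j =
      if j ∈ l then some k else nxt.get? j := by
  induction l generalizing nxt with
  | nil => simp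
  | cons a l ih =>
    simp only [List.foldl_cons, ih]
    by_cases hj : j ∈ l
    · simp [hj]
    · by_cases hja : j = a
      · simp [hja, PySem.Dict.get?_insert_self]
      · simp [hj, hja, PySem.Dict.get?_insert_of_ne _ _ hja]

-- an unresolved index dominates everything strictly between it and t
theorem pvUnres_le (arr : List Int) (t j m : Int) (hu : pvUnres arr t j)
    (hm1 : j < m) (hm2 : m < t) :
    PySem.List.pyGetD arr m 0 ≤ PySem.List.pyGetD arr j 0 := by
  by_contra hlt
  rw [not_le] at hlt
  have hsplit : PySem.List.pyRange (j + 1) t 1 =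
      PySem.List.pyRange (j + 1) m 1 ++ PySem.List.pyRange m t 1 :=
    PySem.List.pyRange_one_append _ _ _ (by omega) (by omega)
  have hcons : PySem.List.pyRange m t 1 = m :: PySem.List.pyRange (m + 1) t 1 :=
    PySem.List.pyRange_one_cons (by omega)
  unfold pvUnres at hu
  rw [hsplit, pvFG_append, hcons] at hu
  simp only [pvFG, if_pos hlt] at hu
  cases h : pvFG arr j (PySem.List.pyRange (j + 1) m 1) <;> simp [h] at hu

-- how 'unresolved' changes when index t is processed
theorem pvUnres_succ (arr : List Int) (t j : Int) (hj : j < t) :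
    (pvUnres arr (t + 1) j ↔
      pvUnres arr t j ∧ ¬ PySem.List.pyGetD arr j 0 < PySem.List.pyGetD arr t 0) := by
  have hsplit : PySem.List.pyRange (j + 1) (t + 1) 1 =
      PySem.List.pyRange (j + 1) t 1 ++ PySem.List.pyRange t (t + 1) 1 :=
    PySem.List.pyRange_one_append _ _ _ (by omega) (by omega)
  unfold pvUnres
  rw [hsplit, pvFG_append, PySem.List.pyRange_one_singleton]
  by_cases h : PySem.List.pyGetD arr j 0 < PySem.List.pyGetD arr t 0 <;>
    cases hfg : pvFG arr j (PySem.List.pyRange (j + 1) t 1) <;>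
      simp [pvFG, h]

-- one step of the stack pass preserves the invariant
theorem pvInv_step (arr : List Int) (t : Int) (stack : List Int) (nxt : PySem.Dict Int Int)
    (ht : 0 ≤ t) (hinv : pvInv arr t stack nxt) :
    pvInv arr (t + 1) (t :: (pvB_pop arr t stack nxt).1) (pvB_pop arr t stack nxt).2 := by
  obtain ⟨hs, hget, hnone⟩ := hinv
  set c : Int → Bool := fun j => decide (PySem.List.pyGetD arr j 0 < PySem.List.pyGetD arr t 0) with hc
  -- monotonicity of c along the stack (values grow towards the bottom)
  have hmono : stack.Pairwise (fun a b => c b = true → c a = true) := by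
    rw [hs, List.pairwise_reverse]
    have hsub : ((PySem.List.pyRange 0 t 1).filter (fun j => decide (pvUnres arr t j))).Pairwise (· < ·) :=
      (PySem.List.pairwise_lt_pyRange_one 0 t).sublist List.filter_sublist
    refine hsub.imp_of_mem ?_
    intro a b ha hb hab
    rcases List.mem_filter.1 ha with ⟨ha', hua⟩
    rcases List.mem_filter.1 hb with ⟨hb', _⟩
    rcases (PySem.List.mem_pyRange_one).1 hb' with ⟨_, hbt⟩
    intro hca
    have hba : PySem.List.pyGetD arr b 0 ≤ PySem.List.pyGetD arr a 0 :=
      pvUnres_le arr t a b (by simpa [pvUnres] using of_decide_eq_true hua) hab hbt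
    simp only [hc, decide_eq_true_eq] at hca ⊢
    omega
  obtain ⟨htake, hdrop⟩ := takeWhile_eq_filter_of_mono c stack hmono
  rw [pvB_pop_eq, ← hc]
  have hmem_take : ∀ j : Int, j ∈ stack.takeWhile c ↔
      (0 ≤ j ∧ j < t ∧ pvUnres arr t j ∧ c j = true) := by
    intro j
    rw [htake, hs]
    simp only [List.filter_reverse, List.mem_reverse, List.mem_filter,
      PySem.List.mem_pyRange_one, decide_eq_true_eq]
    tauto
  refine ⟨?_, ?_, ?_⟩
  · -- stack clause
    rw [hdrop, hs, List.filter_reverse]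
    have hsucc : PySem.List.pyRange 0 (t + 1) 1 =
        PySem.List.pyRange 0 t 1 ++ [t] := PySem.List.pyRange_one_succ_right ht
    rw [hsucc, List.filter_append, List.filter_filter]
    have hPt : (decide (pvUnres arr (t + 1) t)) = true := by
      simp [pvUnres, PySem.List.pyRange_one_eq_nil (by omega : (t:Int) + 1 ≤ t + 1), pvFG]
    have hcong : (PySem.List.pyRange 0 t 1).filter (fun j => decide (pvUnres arr (t+1) j)) =
        (PySem.List.pyRange 0 t 1).filter (fun j => c j = false && decide (pvUnres arr t j)) := by
      refine List.filter_congr ?_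
      intro j hj
      rcases (PySem.List.mem_pyRange_one).1 hj with ⟨_, hjt⟩
      have := pvUnres_succ arr t j hjt
      simp only [hc] at this ⊢
      by_cases h1 : pvUnres arr t j <;> by_cases h2 : PySem.List.pyGetD arr j 0 < PySem.List.pyGetD arr t 0 <;>
        simp [h1, h2, this]
    rw [hcong]
    simp [hPt]
  · -- resolved-values clause
    intro j hj0 hjt1
    rw [get?_foldl_insert]
    by_cases hjt : j = t
    · subst hjt
      have hnot : j ∉ stack.takeWhile c := by
        rw [hmem_take]; omega
      rw [if_neg hnot, hnone j le_rfl]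
      simp [PySem.List.pyRange_one_eq_nil (by omega : (j:Int) + 1 ≤ j + 1), pvFG]
    · have hjt' : j < t := by omega
      have hsplit : PySem.List.pyRange (j + 1) (t + 1) 1 =
          PySem.List.pyRange (j + 1) t 1 ++ [t] := by
        rw [PySem.List.pyRange_one_append (j+1) t (t+1) (by omega) (by omega),
          PySem.List.pyRange_one_singleton]
      rw [hsplit, pvFG_append]
      by_cases hin : j ∈ stack.takeWhile c
      · rw [if_pos hin]
        rcases (hmem_take j).1 hin with ⟨_, _, hu, hcj⟩
        unfold pvUnres at hu
        rw [hu]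
        simp only [hc, decide_eq_true_eq] at hcj
        simp [pvFG, hcj]
      · rw [if_neg hin, hget j hj0 hjt']
        rcases Decidable.em (pvUnres arr t j) with hu | hu
        · have hcj : c j = false := by
            by_contra hcj
            exact hin ((hmem_take j).2 ⟨hj0, hjt', hu, by simpa using hcj⟩)
          unfold pvUnres at hu
          rw [hu]
          simp only [hc, decide_eq_false_iff_not] at hcj
          simp [pvFG, hcj]
        · unfold pvUnres at hu
          cases hfg : pvFG arr j (PySem.List.pyRange (j + 1) t 1) with
          | none => exact absurd hfg hu
          | some v => simp
  · -- untouched clause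
    intro j hj
    rw [get?_foldl_insert]
    have hnot : j ∉ stack.takeWhile c := by
      rw [hmem_take]; omega
    rw [if_neg hnot]
    exact hnone j (by omega)

-- the whole pass establishes the invariant at n
theorem pvB_build_inv (arr : List Int) (n : Int) :
    ∀ (m : Nat) (t : Int) (stack : List Int) (nxt : PySem.Dict Int Int),
      0 ≤ t → t + m = n → pvInv arr t stack nxt →
      pvInv arr n (pvB_build arr (PySem.List.pyRange t n 1) (stack, nxt)).1
                  (pvB_build arr (PySem.List.pyRange t n 1) (stack, nxt)).2 := by
  intro m
  induction m with
  | zero =>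
    intro t stack nxt ht htn hinv
    have : (t : Int) = n := by omega
    subst this
    rw [PySem.List.pyRange_one_eq_nil le_rfl]
    simpa [pvB_build] using hinv
  | succ m ih =>
    intro t stack nxt ht htn hinv
    have hlt : t < n := by omega
    rw [PySem.List.pyRange_one_cons hlt]
    simp only [pvB_build]
    exact ih (t + 1) _ _ (by omega) (by omega) (pvInv_step arr t stack nxt ht hinv)

-- A's j-loop equals B's dict-driven j-scan, when the dict satisfies the invariant lookups
theorem pvA_loopJ_eq (arr : List Int) (n i : Int) (nxt : PySem.Dict Int Int) (js : List Int)
    (hn : ∀ j : Int, 0 ≤ j → j < n → nxt.get? j = pvFG arr j (PySem.List.pyRange (j + 1) n 1))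
    (hjs : ∀ j ∈ js, 0 ≤ j ∧ j < n) :
    pvA_loopJ arr n i js = pvB_scanJ arr nxt i js := by
  induction js with
  | nil => simp [pvA_loopJ, pvB_scanJ]
  | cons j js ih =>
    obtain ⟨hj0, hjn⟩ := hjs j (by simp)
    simp only [pvA_loopJ, pvB_scanJ, pvA_loopK_eq, hn j hj0 hjn]
    by_cases hij : PySem.List.pyGetD arr i 0 < PySem.List.pyGetD arr j 0
    · simp only [if_pos hij]
      cases pvFG arr j (PySem.List.pyRange (j + 1) n 1) with
      | none => simpa using ih (fun x hx => hjs x (by simp [hx]))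
      | some k => simp
    · simpa [if_neg hij] using ih (fun x hx => hjs x (by simp [hx]))

theorem pvA_loopI_eq (arr : List Int) (n : Int) (nxt : PySem.Dict Int Int) (is_ : List Int)
    (hn : ∀ j : Int, 0 ≤ j → j < n → nxt.get? j = pvFG arr j (PySem.List.pyRange (j + 1) n 1))
    (his : ∀ i ∈ is_, 0 ≤ i) :
    pvA_loopI arr n is_ = pvB_scanI arr nxt n is_ := by
  induction is_ with
  | nil => simp [pvA_loopI, pvB_scanI]
  | cons i is_ ih =>
    have hi0 : 0 ≤ i := his i (by simp)
    have hjs : ∀ j ∈ PySem.List.pyRange (i + 1) (n - 1) 1, 0 ≤ j ∧ j < n := by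
      intro j hj
      rw [PySem.List.mem_pyRange_one] at hj
      omega
    simp only [pvA_loopI, pvB_scanI, pvA_loopJ_eq arr n i nxt _ hn hjs]
    cases pvB_scanJ arr nxt i (PySem.List.pyRange (i + 1) (n - 1) 1) with
    | none => simpa using ih (fun x hx => his x (by simp [hx]))
    | some r => simp

-- ===== VERDICT (by name: the statement is the Claim_ definition above) =====
theorem find_sorted_subsequence_naive_spec : Claim_equal_find_sorted_subsequence_naive := by
  intro arr _
  unfold Spec_find_sorted_subsequence_naive find_sorted_subsequence_naive find_sorted_subsequence_naive_alt
  simp only [PySem.List.len_eq]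
  have hinv0 : pvInv arr 0 [] PySem.Dict.empty := by
    refine ⟨by simp [PySem.List.pyRange_one_eq_nil le_rfl], ?_, ?_⟩
    · intro j hj0 hj; omega
    · intro j _; exact PySem.Dict.get?_empty j
  have hinv := pvB_build_inv arr (arr.length : Int) (arr.length) 0 [] PySem.Dict.empty
    le_rfl (by omega) hinv0
  exact pvA_loopI_eq arr _ _ _ hinv.2.1 (fun i hi => ((PySem.List.mem_pyRange_one).1 hi).1)
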